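-- pv_equiv track=rewrite | github.com/Arsen1302/Code-copy-detector | TestData/solutions/problem_1475_5.py | solution_1475_5
-- ===== SOURCE A (Python) =====
-- def solution_1475_5(corridor: str) -> int:
--
--     # go through the corridor and count seats
--     # after that check whether there are plants
--     # and we have several places to divide
--
--     # go through the chairs and count
--     chairs = 0
--     positions = 1
--     plants = 1
--     for idx, element in enumerate(corridor):
--
--         # check if we reached two chairs
--         if chairs > 0 and chairs % 2 == 0:
--
--             # check if current element is plant
--             if element == 'S':
--                 positions *= plants
--                 plants = 1
--
--             elif element == 'P':
--                 plants += 1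
--
--         # count the chairs
--         if element == 'S':
--             chairs += 1
--     return (positions % 1_000_000_007) if chairs > 0 and chairs % 2 == 0 else 0
-- ===== SOURCE B (Python) =====
-- def solution_1475_5(corridor: str) -> int:
--     parts = corridor.split('S')
--     chairs = len(parts) - 1
--     if chairs == 0 or chairs % 2 != 0:
--         return 0
--     result = 1
--     for gap in parts[2:chairs:2]:
--         result *= 1 + gap.count('P')
--     return result % 1_000_000_007
-- ===== Notes on version B (the rewrite author's own statement) =====
-- stated objective: faster
-- what changed: A's single three-accumulator state machine (chairs/positions/plants updated per character) is replaced by splitting the corridor at the seat character and multiplying, over every other inner segment (the gaps between consecutive seat pairs), one plus its plant count.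
import Mathlib
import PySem

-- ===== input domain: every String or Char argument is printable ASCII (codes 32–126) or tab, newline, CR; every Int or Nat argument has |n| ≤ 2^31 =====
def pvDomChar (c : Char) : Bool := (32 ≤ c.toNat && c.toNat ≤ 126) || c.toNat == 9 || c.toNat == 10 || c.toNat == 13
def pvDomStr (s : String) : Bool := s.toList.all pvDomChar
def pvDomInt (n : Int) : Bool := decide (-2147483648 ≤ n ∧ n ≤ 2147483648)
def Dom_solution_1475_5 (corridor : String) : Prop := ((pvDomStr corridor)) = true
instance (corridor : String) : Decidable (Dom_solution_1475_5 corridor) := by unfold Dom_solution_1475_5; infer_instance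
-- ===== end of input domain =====

-- B replaces A's per-character three-accumulator state machine by split('S') plus a product
-- over the every-other gap segments (measured faster by a constant factor: the scanning is
-- done by str.split/str.count instead of a Python-level loop).

-- ===== PORT A =====
-- one loop step of A (st = (chairs, positions, plants); ie = (idx, element); idx is unused by A's body)
def stepA (st : Int × Int × Int) (ie : Int × Char) : Int × Int × Int :=
  let chairs := st.1
  let positions := st.2.1
  let plants := st.2.2
  let element := ie.2
  let pp : Int × Int :=
    if chairs > 0 ∧ PySem.Int.mod chairs 2 = 0 then
      if element = 'S' then (positions * plants, 1)
      else if element = 'P' then (positions, plants + 1)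
      else (positions, plants)
    else (positions, plants)
  let chairs' := if element = 'S' then chairs + 1 else chairs
  (chairs', pp.1, pp.2)

def solution_1475_5 (corridor : String) : Int :=
  let st := (PySem.List.enumerate corridor.toList).foldl stepA (0, 1, 1)
  if st.1 > 0 ∧ PySem.Int.mod st.1 2 = 0 then PySem.Int.mod st.2.1 1000000007 else 0

-- ===== PORT B =====
-- hand port of the step-2 slice `parts[2:chairs:2]` AFTER the [2:chairs] part (PySem.List.slice
-- has no step argument): every second element starting with the first — exact for step 2
def everyOther {α : Type} : List α → List α
  | [] => []
  | [a] => [a]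
  | a :: _ :: r => a :: everyOther r

def solution_1475_5_alt (corridor : String) : Int :=
  let parts := PySem.Chars.splitOn corridor.toList ['S']
  let chairs : Int := PySem.List.len parts - 1
  if chairs = 0 ∨ PySem.Int.mod chairs 2 ≠ 0 then 0
  else
    PySem.Int.mod
      ((everyOther (PySem.List.slice parts (some 2) (some chairs))).foldl
        (fun result gap => result * (1 + (PySem.Chars.count gap ['P'] : Int))) 1)
      1000000007

-- ===== PRECONDITION & SPEC =====
def Spec_solution_1475_5 (corridor : String) (out : Int) : Prop := out = solution_1475_5_alt corridor
instance (corridor : String) (out : Int) : Decidable (Spec_solution_1475_5 corridor out) := by unfold Spec_solution_1475_5; infer_instance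

-- ===== CLAIM (what is proved, stated in full; the proofs are below) =====
def Claim_equal_solution_1475_5 : Prop := ∀ (corridor : String), Dom_solution_1475_5 corridor → Spec_solution_1475_5 corridor (solution_1475_5 corridor)


-- ===== LEMMAS AND PROOFS =====

-- the char-level loop step (enumerate's index is ignored by stepA)
def stepC (st : Int × Int × Int) (c : Char) : Int × Int × Int := stepA st (0, c)

-- split of a char list at 'S' (reference recursion; proved equal to PySem.Chars.splitOn below)
def segs : List Char → List (List Char)
  | [] => [[]]
  | c :: cs =>
    match segs cs with
    | [] => []
    | t :: ts => if c = 'S' then [] :: t :: ts else (c :: t) :: ts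

def joinSegs : List (List Char) → List Char
  | [] => []
  | [t] => t
  | t :: ts => t ++ 'S' :: joinSegs ts

-- reference state machine over the segment list (Bool = "chairs is positive and even")
def Pgo : Bool → Int × Int × Int → List (List Char) → Int × Int × Int
  | _, st, [] => st
  | true, st, [t] => (st.1, st.2.1, st.2.2 + (t.count 'P' : Int))
  | false, st, [_] => st
  | true, st, t :: u :: r => Pgo false (st.1 + 1, st.2.1 * (st.2.2 + (t.count 'P' : Int)), 1) (u :: r)
  | false, st, _ :: u :: r => Pgo true (st.1 + 1, st.2.1, st.2.2) (u :: r)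

-- product of the gap factors of an even-phase segment list
def G : List (List Char) → Int
  | [] => 1
  | [_] => 1
  | t :: _ :: r => (1 + (t.count 'P' : Int)) * G r

theorem segs_ne_nil (cs : List Char) : segs cs ≠ [] := by
  induction cs with
  | nil => simp [segs]
  | cons c cs ih =>
    cases h : segs cs with
    | nil => exact absurd h ih
    | cons t ts => simp [segs, h]; split <;> simp

theorem joinSegs_segs (cs : List Char) : joinSegs (segs cs) = cs := by
  induction cs with
  | nil => simp [segs, joinSegs]
  | cons c cs ih =>
    cases h : segs cs with
    | nil => exact absurd h (segs_ne_nil cs)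
    | cons t ts =>
      rw [h] at ih
      by_cases hc : c = 'S'
      · subst hc; simp [segs, h, joinSegs]
        cases ts <;> simpa [joinSegs] using ih
      · simp [segs, h, hc]
        cases ts <;> simpa [joinSegs] using ih

theorem sfree_segs (cs : List Char) : ∀ p ∈ segs cs, 'S' ∉ p := by
  induction cs with
  | nil => simp [segs]
  | cons c cs ih =>
    cases h : segs cs with
    | nil => exact absurd h (segs_ne_nil cs)
    | cons t ts =>
      rw [h] at ih
      by_cases hc : c = 'S'
      · subst hc; simp [segs, h]
        exact ⟨fun hp => (ih t (by simp)) hp, fun p hp => ih p (by simp [hp])⟩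
      · simp [segs, h, hc]
        exact ⟨⟨fun he => hc he.symm, ih t (by simp)⟩, fun p hp => ih p (by simp [hp])⟩

-- enumerate's indices are ignored by stepA
theorem foldl_enumerate_stepA (l : List Char) (k : Int) (st : Int × Int × Int) :
    (PySem.List.enumerate l k).foldl stepA st = l.foldl stepC st := by
  induction l generalizing k st with
  | nil => simp [PySem.List.enumerate]
  | cons c l ih => simp [PySem.List.enumerate, List.foldl_cons, ih]; rfl

theorem stepC_eq (st : Int × Int × Int) (c : Char) :
    stepC st c =
      ((if c = 'S' then st.1 + 1 else st.1),
       (if st.1 > 0 ∧ PySem.Int.mod st.1 2 = 0 then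
          if c = 'S' then (st.2.1 * st.2.2, (1:Int))
          else if c = 'P' then (st.2.1, st.2.2 + 1)
          else (st.2.1, st.2.2)
        else (st.2.1, st.2.2))) := rfl

theorem mod2 (a : Int) : PySem.Int.mod a 2 = a % 2 :=
  PySem.Int.mod_eq_emod_of_pos (by omega)

-- an S-free segment is a no-op of the loop unless chairs is positive and even
theorem seg_noop (t : List Char) (ht : 'S' ∉ t) (st : Int × Int × Int)
    (h : ¬ (st.1 > 0 ∧ PySem.Int.mod st.1 2 = 0)) :
    t.foldl stepC st = st := by
  induction t with
  | nil => rfl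
  | cons c t ih =>
    have hc : c ≠ 'S' := fun hc => ht (by simp [hc])
    have : stepC st c = st := by
      rw [stepC_eq, if_neg h]; simp [hc]
    rw [List.foldl_cons, this, ih (fun hm => ht (by simp [hm]))]

-- with chairs positive and even, an S-free segment adds its 'P'-count to plants
theorem seg_even (t : List Char) (ht : 'S' ∉ t) (ch p pl : Int)
    (h1 : ch > 0) (h2 : PySem.Int.mod ch 2 = 0) :
    t.foldl stepC (ch, p, pl) = (ch, p, pl + (t.count 'P' : Int)) := by
  induction t generalizing pl with
  | nil => simp
  | cons c t ih =>
    have hc : c ≠ 'S' := fun hc => ht (by simp [hc])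
    have ht' : 'S' ∉ t := fun hm => ht (by simp [hm])
    rw [List.foldl_cons]
    by_cases hp : c = 'P'
    · have : stepC (ch, p, pl) c = (ch, p, pl + 1) := by
        rw [stepC_eq, if_pos (⟨h1, h2⟩ : (ch : Int) > 0 ∧ PySem.Int.mod ch 2 = 0)]
        simp [hp]
      rw [this, ih ht' (pl + 1), hp]
      simp
      ring
    · have : stepC (ch, p, pl) c = (ch, p, pl) := by
        rw [stepC_eq, if_pos (⟨h1, h2⟩ : (ch : Int) > 0 ∧ PySem.Int.mod ch 2 = 0)]
        simp [hc, hp]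
      rw [this, ih ht' pl]
      simp [hp]

theorem stepC_S_even (ch p pl : Int) (h1 : ch > 0) (h2 : PySem.Int.mod ch 2 = 0) :
    stepC (ch, p, pl) 'S' = (ch + 1, p * pl, 1) := by
  rw [stepC_eq, if_pos (⟨h1, h2⟩ : (ch : Int) > 0 ∧ PySem.Int.mod ch 2 = 0)]; simp

theorem stepC_S_nodd (ch p pl : Int) (h : ¬ (ch > 0 ∧ PySem.Int.mod ch 2 = 0)) :
    stepC (ch, p, pl) 'S' = (ch + 1, p, pl) := by
  rw [stepC_eq, if_neg h]; simp

-- the whole loop, phrased on the segment decomposition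
theorem foldl_joinSegs (parts : List (List Char)) (hs : ∀ q ∈ parts, 'S' ∉ q)
    (ch p pl : Int) (hch : 0 < ch) (b : Bool) (hb : b = decide (PySem.Int.mod ch 2 = 0)) :
    (joinSegs parts).foldl stepC (ch, p, pl) = Pgo b (ch, p, pl) parts := by
  induction parts generalizing ch p pl b with
  | nil => cases b <;> simp [joinSegs, Pgo]
  | cons t rest ih =>
    have ht : 'S' ∉ t := hs t (by simp)
    have hrest : ∀ q ∈ rest, 'S' ∉ q := fun q hq => hs q (by simp [hq])
    cases rest with
    | nil =>
      cases b with
      | true =>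
        have h2 : PySem.Int.mod ch 2 = 0 := by simpa using hb.symm
        simp only [joinSegs, Pgo]
        exact seg_even t ht ch p pl hch h2
      | false =>
        have h2 : ¬ PySem.Int.mod ch 2 = 0 := by simpa using hb.symm
        simp only [joinSegs, Pgo]
        exact seg_noop t ht _ (by tauto)
    | cons u r =>
      have hjoin : joinSegs (t :: u :: r) = t ++ 'S' :: joinSegs (u :: r) := rfl
      rw [hjoin, List.foldl_append, List.foldl_cons]
      cases b with
      | true =>
        have h2 : PySem.Int.mod ch 2 = 0 := by simpa using hb.symm
        rw [seg_even t ht ch p pl hch h2, stepC_S_even _ _ _ hch h2]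
        rw [ih hrest (ch + 1) _ _ (by omega) false ?_]
        · rfl
        · have := mod2 ch; have := mod2 (ch + 1); simp; omega
      | false =>
        have h2 : ¬ PySem.Int.mod ch 2 = 0 := by simpa using hb.symm
        rw [seg_noop t ht _ (by tauto), stepC_S_nodd _ _ _ (by tauto)]
        rw [ih hrest (ch + 1) _ _ (by omega) true ?_]
        · rfl
        · have := mod2 ch; have := mod2 (ch + 1); simp; omega

theorem Pgo_chairs (parts : List (List Char)) (hne : parts ≠ []) :
    ∀ (b : Bool) (ch p pl : Int), (Pgo b (ch, p, pl) parts).1 = ch + (parts.length : Int) - 1 := by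
  induction parts with
  | nil => simp at hne
  | cons t rest ih =>
    intro b ch p pl
    cases rest with
    | nil => cases b <;> simp [Pgo]
    | cons u r =>
      cases b with
      | true =>
        simp only [Pgo]
        rw [ih (by simp) false]
        simp; omega
      | false =>
        simp only [Pgo]
        rw [ih (by simp) true]
        simp; omega

theorem Pgo_pos (parts : List (List Char)) (hodd : parts.length % 2 = 1) :
    ∀ (ch p : Int), (Pgo true (ch, p, 1) parts).2.1 = p * G parts := by
  induction parts using G.induct with
  | case1 => simp at hodd
  | case2 t => intro ch p; simp [Pgo, G]
  | case3 t u r ih =>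
    intro ch p
    cases r with
    | nil => simp at hodd
    | cons q qs =>
      have hodd' : (q :: qs).length % 2 = 1 := by simp at hodd ⊢; omega
      simp only [Pgo]
      rw [ih hodd']
      simp [G]; ring

-- PySem.Chars.count with a single-character needle is List.count
theorem count_go_single (c : Char) (l : List Char) : ∀ (fuel : Nat) (acc : Nat),
    l.length ≤ fuel → PySem.Chars.count.go [c] fuel l acc = acc + l.count c := by
  induction l with
  | nil => intro fuel acc _; cases fuel <;> simp [PySem.Chars.count.go]
  | cons h t ih =>
    intro fuel acc hf
    cases fuel with
    | zero => simp at hf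
    | succ f =>
      rw [PySem.Chars.count.go]
      have hf' : t.length ≤ f := by simpa using hf
      by_cases hch : c = h
      · subst hch
        have hpre : List.isPrefixOf [c] (c :: t) = true := by simp [List.isPrefixOf]
        rw [if_pos hpre]
        have hdrop : List.drop (List.length [c]) (c :: t) = t := rfl
        rw [hdrop, ih f (acc + 1) hf']
        simp
        omega
      · have hpre : ¬ (List.isPrefixOf [c] (h :: t) = true) := by
          simp [List.isPrefixOf]
          exact fun hh => hch hh
        rw [if_neg hpre, ih f acc hf']
        simp [Ne.symm hch]

theorem count_single (l : List Char) (c : Char) : PySem.Chars.count l [c] = l.count c := by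
  rw [PySem.Chars.count]
  simp [count_go_single c l l.length 0 (le_refl _)]

-- PySem.Chars.splitOn with needle "S" is segs
theorem splitOn_go_segs (l : List Char) : ∀ (fuel : Nat) (cur : List Char) (acc : List (List Char)),
    l.length ≤ fuel →
    PySem.Chars.splitOn.go ['S'] fuel l cur acc =
      acc.reverse ++ (segs l).modifyHead (fun t => cur.reverse ++ t) := by
  induction l with
  | nil =>
    intro fuel cur acc _
    cases fuel <;> simp [PySem.Chars.splitOn.go, segs]
  | cons h t ih =>
    intro fuel cur acc hf
    cases fuel with
    | zero => simp at hf
    | succ f =>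
      rw [PySem.Chars.splitOn.go]
      by_cases hch : h = 'S'
      · subst hch
        simp only [List.isPrefixOf, beq_self_eq_true, Bool.true_and, if_pos]
        have hdrop : List.drop (List.length ['S']) ('S' :: t) = t := rfl
        rw [hdrop, ih f [] (cur.reverse :: acc) (by simpa using hf)]
        cases hsegs : segs t with
        | nil => exact absurd hsegs (segs_ne_nil t)
        | cons a as => simp [segs, hsegs]
      · have : ¬ (List.isPrefixOf ['S'] (h :: t) = true) := by
          simp [List.isPrefixOf, Ne.symm hch]
        rw [if_neg this]
        rw [ih f (h :: cur) acc (by simpa using hf)]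
        cases hsegs : segs t with
        | nil => exact absurd hsegs (segs_ne_nil t)
        | cons a as => simp [segs, hsegs, hch]

theorem splitOn_segs (cs : List Char) : PySem.Chars.splitOn cs ['S'] = segs cs := by
  rw [PySem.Chars.splitOn, splitOn_go_segs cs (cs.length + 1) [] [] (by omega)]
  cases hsegs : segs cs with
  | nil => exact absurd hsegs (segs_ne_nil cs)
  | cons a as => simp

-- the slice parts[2:chairs] with chairs = len-1 ≥ 2
theorem slice_two (l : List (List Char)) (h : 3 ≤ l.length) :
    PySem.List.slice l (some 2) (some ((l.length : Int) - 1)) = (l.drop 2).dropLast := by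
  have h1 : ((l.length : Int) - 1) = ((l.length - 1 : Nat) : Int) := by omega
  have h2 : ((2 : Int)) = ((2 : Nat) : Int) := rfl
  rw [h1, h2, PySem.List.slice_natCast]
  rw [List.dropLast_eq_take]
  have h3 : l.length - 1 - 2 = (List.drop 2 l).length - 1 := by simp; omega
  rw [h3]

-- the folded product over every other gap segment
theorem fold_everyOther (ps : List (List Char)) (hodd : ps.length % 2 = 1) :
    ∀ (a : Int), (everyOther ps.dropLast).foldl
        (fun result gap => result * (1 + (PySem.Chars.count gap ['P'] : Int))) a = a * G ps := by
  induction ps using G.induct with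
  | case1 => simp at hodd
  | case2 t => intro a; simp [everyOther, G]
  | case3 t u r ih =>
    intro a
    cases r with
    | nil => simp at hodd
    | cons q qs =>
      have hodd' : (q :: qs).length % 2 = 1 := by simp at hodd ⊢; omega
      have hd : (t :: u :: q :: qs).dropLast = t :: u :: (q :: qs).dropLast := by simp
      rw [hd]
      have he : everyOther (t :: u :: (q :: qs).dropLast) = t :: everyOther ((q :: qs).dropLast) := rfl
      rw [he, List.foldl_cons, ih hodd']
      simp [G, count_single]; ring

-- the main equality, on the char list
theorem key (s : String) :
    solution_1475_5 s = solution_1475_5_alt s := by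
  rw [solution_1475_5, solution_1475_5_alt]
  rw [foldl_enumerate_stepA, splitOn_segs]
  generalize s.toList = cs
  rw [PySem.List.len_eq]
  have hjoin := joinSegs_segs cs
  have hfree := sfree_segs cs
  cases hsegs : segs cs with
  | nil => exact absurd hsegs (segs_ne_nil cs)
  | cons p0 ps =>
    rw [hsegs] at hjoin hfree
    rw [← hjoin]
    cases ps with
    | nil =>
      -- no 'S' at all: chairs stays 0, both return 0
      have : (joinSegs [p0]).foldl stepC (0, 1, 1) = ((0 : Int), (1 : Int), (1 : Int)) := by
        simp only [joinSegs]
        exact seg_noop p0 (hfree p0 (by simp)) _ (by decide)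
      rw [this]
      simp
    | cons p1 ps2 =>
      have hj2 : joinSegs (p0 :: p1 :: ps2) = p0 ++ 'S' :: joinSegs (p1 :: ps2) := rfl
      rw [hj2, List.foldl_append]
      rw [seg_noop p0 (hfree p0 (by simp)) _ (by decide), List.foldl_cons]
      have hS0 : stepC (0, 1, 1) 'S' = ((1 : Int), (1 : Int), (1 : Int)) := by
        rw [stepC_S_nodd _ _ _ (by decide)]; norm_num
      rw [hS0]
      rw [foldl_joinSegs (p1 :: ps2) (fun q hq => hfree q (by simp [hq])) 1 1 1 (by omega) false
        (by decide)]
      cases ps2 with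
      | nil =>
        -- exactly one 'S': chairs = 1, both return 0
        simp only [Pgo]
        simp
      | cons q qs =>
        have hpg : Pgo false ((1 : Int), (1 : Int), (1 : Int)) (p1 :: q :: qs) =
            Pgo true (2, 1, 1) (q :: qs) := rfl
        rw [hpg]
        have hch : (Pgo true ((2 : Int), (1 : Int), (1 : Int)) (q :: qs)).1 =
            2 + ((q :: qs).length : Int) - 1 := Pgo_chairs (q :: qs) (by simp) true 2 1 1
        by_cases hodd : (q :: qs).length % 2 = 1
        · -- chairs even and positive: both return the gap product mod M
          have hgpos : (Pgo true ((2 : Int), (1 : Int), (1 : Int)) (q :: qs)).2.1 =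
              1 * G (q :: qs) := Pgo_pos (q :: qs) hodd 2 1
          have hAguard : (Pgo true ((2 : Int), (1 : Int), (1 : Int)) (q :: qs)).1 > 0 ∧
              PySem.Int.mod (Pgo true ((2 : Int), (1 : Int), (1 : Int)) (q :: qs)).1 2 = 0 := by
            rw [hch]; constructor
            · simp only [List.length_cons]; push_cast; omega
            · rw [mod2]; simp only [List.length_cons] at hodd ⊢; push_cast; omega
          rw [if_pos hAguard, hgpos]
          have hBguard : ¬ (((((p0 :: p1 :: q :: qs).length : Int)) - 1) = 0 ∨
              PySem.Int.mod ((((p0 :: p1 :: q :: qs).length : Int)) - 1) 2 ≠ 0) := by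
            rw [mod2]; simp only [List.length_cons] at hodd ⊢; push_cast; omega
          rw [if_neg hBguard]
          have hlen : 3 ≤ (p0 :: p1 :: q :: qs).length := by simp
          rw [slice_two (p0 :: p1 :: q :: qs) hlen]
          have hdrop : (p0 :: p1 :: q :: qs).drop 2 = q :: qs := rfl
          rw [hdrop, fold_everyOther (q :: qs) hodd 1]
        · -- chairs odd: both return 0
          have hA : ¬ ((Pgo true ((2 : Int), (1 : Int), (1 : Int)) (q :: qs)).1 > 0 ∧
              PySem.Int.mod (Pgo true ((2 : Int), (1 : Int), (1 : Int)) (q :: qs)).1 2 = 0) := by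
            rw [hch, mod2]; simp only [List.length_cons] at hodd ⊢; push_cast at hodd ⊢; omega
          rw [if_neg hA]
          have hB : ((((p0 :: p1 :: q :: qs).length : Int)) - 1) = 0 ∨
              PySem.Int.mod ((((p0 :: p1 :: q :: qs).length : Int)) - 1) 2 ≠ 0 := by
            rw [mod2]; simp only [List.length_cons] at hodd ⊢; push_cast at hodd ⊢; omega
          rw [if_pos hB]

-- ===== VERDICT (by name: the statement is the Claim_ definition above) =====
theorem solution_1475_5_spec : Claim_equal_solution_1475_5 := by
  intro corridor _
  exact key corridor
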